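-- pv_equiv track=rewrite | github.com/armysarge/DeckForgeAI | ai_deckbuilder.py | _calculate_mana_curve
-- ===== SOURCE A (Python) =====
-- def _calculate_mana_curve(cards):
--     """Calculate the mana curve of a deck."""
--     mana_curve = {}
--     for i in range(8):  # 0-7+ mana
--         cost = i
--         if i == 7:
--             # 7+ mana
--             count = sum(1 for card in cards if card['cost'] >= 7)
--         else:
--             count = sum(1 for card in cards if card['cost'] == cost)
--         mana_curve[str(cost)] = count
--     return mana_curve
-- ===== SOURCE B (Python) =====
-- def _calculate_mana_curve(cards):
--     """Calculate the mana curve of a deck (single pass over the cards)."""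
--     counts = [0] * 8
--     for card in cards:
--         c = card['cost']
--         if c >= 7:
--             counts[7] += 1
--         elif c >= 0:
--             counts[c] += 1
--         # negative costs fall in no bucket, exactly as in the per-bucket scans
--     return {str(i): n for i, n in enumerate(counts)}
-- ===== Notes on version B (the rewrite author's own statement) =====
-- stated objective: faster
-- what changed: replaces A's eight separate scans of the card list (one per mana bucket, built inside a range(8) loop) by a single accumulation pass over the cards into an 8-slot counter array, rendered as the result dict at the end
import Mathlib
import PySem

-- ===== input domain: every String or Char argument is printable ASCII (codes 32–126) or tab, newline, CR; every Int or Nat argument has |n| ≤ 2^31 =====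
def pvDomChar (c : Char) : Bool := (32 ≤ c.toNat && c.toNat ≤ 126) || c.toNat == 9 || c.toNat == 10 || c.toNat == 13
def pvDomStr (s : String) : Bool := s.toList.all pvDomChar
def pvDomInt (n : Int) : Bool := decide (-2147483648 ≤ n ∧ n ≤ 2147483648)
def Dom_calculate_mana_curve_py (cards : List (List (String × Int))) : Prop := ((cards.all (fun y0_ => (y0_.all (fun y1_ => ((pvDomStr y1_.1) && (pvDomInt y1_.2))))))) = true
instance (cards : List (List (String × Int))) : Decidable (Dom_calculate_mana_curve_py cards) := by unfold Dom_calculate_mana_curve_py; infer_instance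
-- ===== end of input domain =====

-- B replaces A's eight scans of the card list (one per mana bucket) by a single
-- accumulation pass into an 8-slot counter array (objective: faster, constant factor).

-- card['cost']: first match in the association list; the .getD 0 default is never
-- reached under Pre_ (key present); on a missing key Python raises KeyError (excluded by Pre_).
def pvLookupCost (card : List (String × Int)) : Int :=
  (((card.find? (fun kv => kv.1 == "cost")).map (·.2)).getD 0)

-- ===== PORT A =====
def calculate_mana_curve_py (cards : List (List (String × Int))) : List (String × Int) :=
  ((PySem.List.pyRange 0 8 1).foldl (fun mana_curve i =>
      let cost := i
      let count : Int :=
        if i == 7 then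
          ((cards.filter (fun card => pvLookupCost card ≥ 7)).map (fun _ => (1 : Int))).sum
        else
          ((cards.filter (fun card => pvLookupCost card == cost)).map (fun _ => (1 : Int))).sum
      PySem.Dict.insert mana_curve (PySem.Int.toStr cost) count)
    PySem.Dict.empty).items

-- ===== PORT B =====
def calculate_mana_curve_py_alt (cards : List (List (String × Int))) : List (String × Int) :=
  let counts := cards.foldl (fun counts card =>
      let c := pvLookupCost card
      if c ≥ 7 then counts.set 7 (counts.getD 7 0 + 1)
      -- counts[c] += 1: 0 ≤ c ≤ 6 < len(counts) on this branch, so .toNat/.set/.getD are exact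
      else if c ≥ 0 then counts.set c.toNat (counts.getD c.toNat 0 + 1)
      else counts) (List.replicate 8 (0 : Int))
  (PySem.List.enumerate counts 0).map (fun p => (PySem.Int.toStr p.1, p.2))

-- ===== PRECONDITION & SPEC =====
-- Pre_ excludes cards without a 'cost' key, on which the Python A raises KeyError.
def Pre_calculate_mana_curve_py (cards : List (List (String × Int))) : Prop :=
  ∀ card ∈ cards, card.any (fun kv => kv.1 == "cost") = true

instance (cards : List (List (String × Int))) : Decidable (Pre_calculate_mana_curve_py cards) := by
  unfold Pre_calculate_mana_curve_py; infer_instance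

def pvWitness_calculate_mana_curve_py : (List (List (String × Int))) :=
  [[("cost", 3)], [("cost", 9)], [("name", 0), ("cost", -1)]]

def Spec_calculate_mana_curve_py (cards : List (List (String × Int))) (out : List (String × Int)) : Prop := out = calculate_mana_curve_py_alt cards
instance (cards : List (List (String × Int))) (out : List (String × Int)) : Decidable (Spec_calculate_mana_curve_py cards out) := by unfold Spec_calculate_mana_curve_py; infer_instance

-- ===== CLAIM (what is proved, stated in full; the proofs are below) =====
def Claim_equal_calculate_mana_curve_py : Prop := ∀ (cards : List (List (String × Int))), Dom_calculate_mana_curve_py cards → Pre_calculate_mana_curve_py cards → Spec_calculate_mana_curve_py cards (calculate_mana_curve_py cards)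

-- ===== LEMMAS AND PROOFS =====

-- A's per-bucket counts, as named abbreviations
def pvCntEq (cards : List (List (String × Int))) (i : Int) : Int :=
  ((cards.filter (fun card => pvLookupCost card == i)).map (fun _ => (1 : Int))).sum
def pvCntGe (cards : List (List (String × Int))) : Int :=
  ((cards.filter (fun card => pvLookupCost card ≥ 7)).map (fun _ => (1 : Int))).sum

lemma pvCntEq_cons (x : List (String × Int)) (l : List (List (String × Int))) (i : Int) :
    pvCntEq (x :: l) i = (if pvLookupCost x == i then 1 else 0) + pvCntEq l i := by
  simp only [pvCntEq, List.filter_cons]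
  by_cases h : pvLookupCost x == i <;> simp [h]

lemma pvCntGe_cons (x : List (String × Int)) (l : List (List (String × Int))) :
    pvCntGe (x :: l) = (if pvLookupCost x ≥ 7 then 1 else 0) + pvCntGe l := by
  simp only [pvCntGe, List.filter_cons]
  by_cases h : pvLookupCost x ≥ 7 <;> simp [h]

-- B's accumulation pass, characterised bucket by bucket
lemma pvBfold (cards : List (List (String × Int))) (a0 a1 a2 a3 a4 a5 a6 a7 : Int) :
    cards.foldl (fun counts card =>
      let c := pvLookupCost card
      if c ≥ 7 then counts.set 7 (counts.getD 7 0 + 1)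
      else if c ≥ 0 then counts.set c.toNat (counts.getD c.toNat 0 + 1)
      else counts) [a0, a1, a2, a3, a4, a5, a6, a7] =
    [a0 + pvCntEq cards 0, a1 + pvCntEq cards 1, a2 + pvCntEq cards 2, a3 + pvCntEq cards 3,
     a4 + pvCntEq cards 4, a5 + pvCntEq cards 5, a6 + pvCntEq cards 6, a7 + pvCntGe cards] := by
  induction cards generalizing a0 a1 a2 a3 a4 a5 a6 a7 with
  | nil => simp [pvCntEq, pvCntGe]
  | cons x l ih =>
    simp only [List.foldl_cons, pvCntEq_cons, pvCntGe_cons]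
    obtain ⟨c, hc⟩ : ∃ c, pvLookupCost x = c := ⟨_, rfl⟩
    rw [hc]
    by_cases h7 : c ≥ 7
    · rw [if_pos h7,
        show ([a0,a1,a2,a3,a4,a5,a6,a7].set 7 (([a0,a1,a2,a3,a4,a5,a6,a7].getD 7 0) + 1))
            = [a0,a1,a2,a3,a4,a5,a6,a7 + 1] from rfl, ih]
      have hne : ∀ i : Int, i < 7 → (c == i) = false := by intro i hi; simp; omega
      simp [hne 0 (by omega), hne 1 (by omega), hne 2 (by omega), hne 3 (by omega),
            hne 4 (by omega), hne 5 (by omega), hne 6 (by omega), h7]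
      ring
    · by_cases h0 : c ≥ 0
      · have hlt : c < 7 := by omega
        have h0' : (0:Int) ≤ c := h0
        interval_cases c
        · rw [if_neg (by norm_num), if_pos (by norm_num)]
          exact (ih (a0 + 1) a1 a2 a3 a4 a5 a6 a7).trans (by norm_num; ring)
        · rw [if_neg (by norm_num), if_pos (by norm_num)]
          exact (ih a0 (a1 + 1) a2 a3 a4 a5 a6 a7).trans (by norm_num; ring)
        · rw [if_neg (by norm_num), if_pos (by norm_num)]
          exact (ih a0 a1 (a2 + 1) a3 a4 a5 a6 a7).trans (by norm_num; ring)
        · rw [if_neg (by norm_num), if_pos (by norm_num)]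
          exact (ih a0 a1 a2 (a3 + 1) a4 a5 a6 a7).trans (by norm_num; ring)
        · rw [if_neg (by norm_num), if_pos (by norm_num)]
          exact (ih a0 a1 a2 a3 (a4 + 1) a5 a6 a7).trans (by norm_num; ring)
        · rw [if_neg (by norm_num), if_pos (by norm_num)]
          exact (ih a0 a1 a2 a3 a4 (a5 + 1) a6 a7).trans (by norm_num; ring)
        · rw [if_neg (by norm_num), if_pos (by norm_num)]
          exact (ih a0 a1 a2 a3 a4 a5 (a6 + 1) a7).trans (by norm_num; ring)
      · rw [if_neg h7, if_neg h0, ih]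
        have hne : ∀ i : Int, 0 ≤ i → (c == i) = false := by intro i hi; simp; omega
        simp [hne 0 (by omega), hne 1 (by omega), hne 2 (by omega), hne 3 (by omega),
              hne 4 (by omega), hne 5 (by omega), hne 6 (by omega), h7]

-- ===== VERDICT (by name: the statement is the Claim_ definition above) =====
theorem calculate_mana_curve_py_spec : Claim_equal_calculate_mana_curve_py := by
  intro cards _ _
  unfold Spec_calculate_mana_curve_py calculate_mana_curve_py calculate_mana_curve_py_alt
  rw [show (List.replicate 8 (0:Int)) = [0,0,0,0,0,0,0,0] from rfl, pvBfold,
    show PySem.List.pyRange 0 8 1 = [0,1,2,3,4,5,6,7] from by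
      simp [PySem.List.pyRange_one, List.range_succ],
    PySem.Dict.items_foldl_insert_fresh _ _ _ _
      (by intro a _; exact PySem.Dict.contains_empty _) (by decide)]
  simp [PySem.Dict.empty, PySem.List.enumerate, pvCntEq, pvCntGe,
    show PySem.Int.toStr 0 = "0" from rfl, show PySem.Int.toStr 1 = "1" from rfl,
    show PySem.Int.toStr 2 = "2" from rfl, show PySem.Int.toStr 3 = "3" from rfl,
    show PySem.Int.toStr 4 = "4" from rfl, show PySem.Int.toStr 5 = "5" from rfl,
    show PySem.Int.toStr 6 = "6" from rfl, show PySem.Int.toStr 7 = "7" from rfl]
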